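-- pv_equiv track=rewrite | github.com/fdfdsf/Joint-extraction-with-self-attention | ADE/utils.py | ConvertToEntity
-- ===== SOURCE A (Python) =====
-- def ConvertToEntity(seq, tag2id):
--     # method implemented in https://github.com/guillaumegenthial/sequence_tagging/blob/master/model/data_utils.py
--     """Given a sequence of tags, group entities and their position
--     Args:
--         seq: [4, 4, 0, 0, ...] sequence of labels
--         tags: dict["O"] = 4
--     Returns:
--         list of (chunk_type, chunk_start, chunk_end)
--     Example:
--         seq = [4, 5, 0, 3]
--         tags = {"B-PER": 4, "I-PER": 5, "B-LOC": 3}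
--         result = [("PER", 0, 2), ("LOC", 3, 4)]
--     """
--     id2tag = dict(zip(tag2id.values(), tag2id.keys()))
--
--     default = tag2id['O']
--     # idx_to_tag = {idx: tag for tag, idx in tags.items()}
--     chunks = []
--     chunk_type, chunk_start = None, None
--     for i, tok in enumerate(seq):
--         # End of a chunk 1
--         if tok == default and chunk_type is not None:
--             # Add a chunk.
--             chunk = (chunk_type, chunk_start, i-1)
--             chunks.append(chunk)
--             chunk_type, chunk_start = None, None
--
--         # End of a chunk + start of a chunk!
--         elif tok != default:
--             tok_chunk_class, tok_chunk_type = id2tag[tok].split('-')[0], id2tag[tok].split('-')[-1]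
--             if chunk_type is None:
--                 chunk_type, chunk_start = tok_chunk_type, i
--             elif tok_chunk_type != chunk_type or tok_chunk_class == "B":
--                 chunk = (chunk_type, chunk_start, i-1)
--                 chunks.append(chunk)
--                 chunk_type, chunk_start = tok_chunk_type, i
--         else:
--             pass
--
--     # end condition
--     if chunk_type is not None:
--         chunk = (chunk_type, chunk_start, len(seq)-1)
--         chunks.append(chunk)
--
--     return chunks
-- ===== SOURCE B (Python) =====
-- def ConvertToEntity(seq, tag2id):
--     id2tag = {v: k for k, v in tag2id.items()}
--     default = tag2id['O']
--     chunks = []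
--     n = len(seq)
--     i = 0
--     while i < n:
--         if seq[i] == default:
--             i += 1
--             continue
--         parts = id2tag[seq[i]].split('-')
--         ty = parts[-1]
--         start = i
--         i += 1
--         while i < n and seq[i] != default:
--             p = id2tag[seq[i]].split('-')
--             if p[-1] != ty or p[0] == 'B':
--                 break
--             i += 1
--         chunks.append((ty, start, i - 1))
--     return chunks
-- ===== Notes on version B (the rewrite author's own statement) =====
-- stated objective: simpler
-- what changed: Replaced A's flat per-token state machine (chunk_type/chunk_start state variables plus a separate end-of-sequence flush) by an outer while-loop that consumes one whole entity per iteration via an inner while-loop, so no open-chunk state survives across iterations and no final flush is needed.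
import Mathlib
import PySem

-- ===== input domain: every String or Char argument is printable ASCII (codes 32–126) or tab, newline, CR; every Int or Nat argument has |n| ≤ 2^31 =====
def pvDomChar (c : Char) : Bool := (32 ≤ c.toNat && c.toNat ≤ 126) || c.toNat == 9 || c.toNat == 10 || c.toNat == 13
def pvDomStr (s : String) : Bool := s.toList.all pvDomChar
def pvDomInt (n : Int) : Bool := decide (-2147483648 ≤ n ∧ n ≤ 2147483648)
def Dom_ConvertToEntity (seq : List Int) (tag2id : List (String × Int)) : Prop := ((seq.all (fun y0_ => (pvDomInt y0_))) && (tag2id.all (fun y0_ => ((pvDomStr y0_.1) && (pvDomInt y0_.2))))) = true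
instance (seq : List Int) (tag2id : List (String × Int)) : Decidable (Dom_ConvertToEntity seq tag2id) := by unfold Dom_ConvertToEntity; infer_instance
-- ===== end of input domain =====

-- B replaces A's flat per-token state machine (open-chunk state + end-of-sequence flush) by an
-- outer loop consuming one whole entity per iteration via an inner while-loop (objective: simpler).
-- Both ports read tag2id with dict semantics (first-match lookup for the assoc list).

-- ===== PORT A =====

-- tag.split('-') (sep "-" is nonempty, so split? is always some; getD [] is unreachable)
def pvSplit (tag : String) : List String := (PySem.Str.split? tag "-").getD []

-- epilogue of A: the end-of-sequence flush of a still-open chunk (n = len(seq))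
def pvFinA (n : Int) (r : List (String × Int × Int) × Option (String × Int)) :
    List (String × Int × Int) :=
  match r.2 with
  | none => r.1
  | some (ty, st) => r.1 ++ [(ty, st, n - 1)]

-- the body of A's for-loop: state = (chunks so far, open chunk), token = (i, tok)
def pvStepA (id2tag : PySem.Dict Int String) (dflt : Int)
    (acc : List (String × Int × Int) × Option (String × Int)) (p : Int × Int) :
    List (String × Int × Int) × Option (String × Int) :=
  let i := p.1
  let tok := p.2
  if tok = dflt then
    match acc.2 with
    | some (ty, st) => (acc.1 ++ [(ty, st, i - 1)], none)   -- end of a chunk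
    | none => acc                                            -- else: pass
  else
    -- id2tag[tok].split('-')[0], id2tag[tok].split('-')[-1]  (KeyError excluded by Pre_)
    let cls := PySem.List.pyGetD (pvSplit (id2tag.getD tok "")) 0 ""
    let ty' := PySem.List.pyGetD (pvSplit (id2tag.getD tok "")) (-1) ""
    match acc.2 with
    | none => (acc.1, some (ty', i))
    | some (ty, st) =>
      if ty' ≠ ty ∨ cls = "B" then (acc.1 ++ [(ty, st, i - 1)], some (ty', i))
      else acc

def ConvertToEntity (seq : List Int) (tag2id : List (String × Int)) : List (String × Int × Int) :=
  let t : PySem.Dict String Int := PySem.Dict.mk tag2id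
  -- id2tag = dict(zip(tag2id.values(), tag2id.keys()))
  let id2tag : PySem.Dict Int String :=
    ((t.values).zip t.keys).foldl (fun d p => d.insert p.1 p.2) PySem.Dict.empty
  match t.get? "O" with
  | none => []   -- Python: KeyError on tag2id['O']; excluded by Pre_
  | some dflt =>
    pvFinA (seq.length : Int)
      ((PySem.List.enumerate seq).foldl (pvStepA id2tag dflt) ([], none))

-- ===== PORT B =====

def pvTyOf (id2tag : PySem.Dict Int String) (tok : Int) : String :=
  PySem.List.pyGetD (pvSplit (id2tag.getD tok "")) (-1) ""

def pvClsOf (id2tag : PySem.Dict Int String) (tok : Int) : String :=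
  PySem.List.pyGetD (pvSplit (id2tag.getD tok "")) 0 ""

-- B's inner while-loop: how many further tokens the entity of type ty absorbs
def pvConsume (id2tag : PySem.Dict Int String) (dflt : Int) (ty : String) : List Int → Nat
  | [] => 0
  | tok :: rest =>
    if tok ≠ dflt ∧ pvTyOf id2tag tok = ty ∧ pvClsOf id2tag tok ≠ "B" then
      pvConsume id2tag dflt ty rest + 1
    else 0

-- B's outer while-loop: one entity emitted per iteration, i = index of the head of the list
def pvAltGo (id2tag : PySem.Dict Int String) (dflt : Int) : Int → List Int → List (String × Int × Int)
  | _, [] => []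
  | i, tok :: rest =>
    if tok = dflt then pvAltGo id2tag dflt (i + 1) rest
    else
      let ty := pvTyOf id2tag tok
      let k := pvConsume id2tag dflt ty rest
      (ty, i, i + k) :: pvAltGo id2tag dflt (i + 1 + k) (rest.drop k)
  termination_by _ l => l.length
  decreasing_by
    · simp only [List.length_cons]; omega
    · simp only [List.length_drop, List.length_cons]; omega

def ConvertToEntity_alt (seq : List Int) (tag2id : List (String × Int)) : List (String × Int × Int) :=
  -- id2tag = {v: k for k, v in tag2id.items()}
  let id2tag : PySem.Dict Int String :=
    tag2id.foldl (fun d p => d.insert p.2 p.1) PySem.Dict.empty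
  match (PySem.Dict.mk tag2id).get? "O" with
  | none => []   -- Python: KeyError; excluded by Pre_
  | some dflt => pvAltGo id2tag dflt 0 seq

-- ===== PRECONDITION & SPEC =====
-- Pre_ excludes exactly the inputs where Python A raises KeyError: 'O' missing from tag2id,
-- or a token of seq that is neither the default id nor one of tag2id's values.
def Pre_ConvertToEntity (seq : List Int) (tag2id : List (String × Int)) : Prop :=
  "O" ∈ tag2id.map Prod.fst ∧ ∀ tok ∈ seq, tok ∈ tag2id.map Prod.snd
instance (seq : List Int) (tag2id : List (String × Int)) : Decidable (Pre_ConvertToEntity seq tag2id) := by unfold Pre_ConvertToEntity; infer_instance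

def pvWitness_ConvertToEntity : List Int × (List (String × Int)) :=
  ([4, 5, 0, 3], [("B-PER", 4), ("I-PER", 5), ("B-LOC", 3), ("O", 0)])

def Spec_ConvertToEntity (seq : List Int) (tag2id : List (String × Int)) (out : List (String × Int × Int)) : Prop := out = ConvertToEntity_alt seq tag2id
instance (seq : List Int) (tag2id : List (String × Int)) (out : List (String × Int × Int)) : Decidable (Spec_ConvertToEntity seq tag2id out) := by unfold Spec_ConvertToEntity; infer_instance

-- ===== CLAIM (what is proved, stated in full; the proofs are below) =====
def Claim_equal_ConvertToEntity : Prop := ∀ (seq : List Int) (tag2id : List (String × Int)), Dom_ConvertToEntity seq tag2id → Pre_ConvertToEntity seq tag2id → Spec_ConvertToEntity seq tag2id (ConvertToEntity seq tag2id)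

-- ===== LEMMAS AND PROOFS =====

-- the two id2tag constructions (zip(values, keys) vs items-comprehension) build the same dict
lemma pvId2tag_eq (tag2id : List (String × Int)) :
    (((PySem.Dict.mk tag2id).values).zip (PySem.Dict.mk tag2id).keys).foldl
        (fun d p => d.insert p.1 p.2) PySem.Dict.empty =
      tag2id.foldl (fun d p => d.insert p.2 p.1) PySem.Dict.empty := by
  have h : ((PySem.Dict.mk tag2id).values).zip (PySem.Dict.mk tag2id).keys
      = tag2id.map (fun p => (p.2, p.1)) := by
    simp [PySem.Dict.values_mk, PySem.Dict.keys_mk, List.zip_map']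
  rw [h, List.foldl_map]

-- equation lemmas for B's outer loop
lemma pvAltGo_nil (id2tag : PySem.Dict Int String) (dflt i : Int) :
    pvAltGo id2tag dflt i [] = [] := by rw [pvAltGo]

lemma pvAltGo_cons (id2tag : PySem.Dict Int String) (dflt i tok : Int) (rest : List Int) :
    pvAltGo id2tag dflt i (tok :: rest) =
      if tok = dflt then pvAltGo id2tag dflt (i + 1) rest
      else
        (pvTyOf id2tag tok, i,
          i + (pvConsume id2tag dflt (pvTyOf id2tag tok) rest : Int)) ::
          pvAltGo id2tag dflt
            (i + 1 + (pvConsume id2tag dflt (pvTyOf id2tag tok) rest : Int))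
            (rest.drop (pvConsume id2tag dflt (pvTyOf id2tag tok) rest)) := by
  rw [pvAltGo]

-- equation lemmas for B's inner loop
lemma pvConsume_cons_pos (id2tag : PySem.Dict Int String) (dflt tok : Int) (ty : String)
    (rest : List Int)
    (h : tok ≠ dflt ∧ pvTyOf id2tag tok = ty ∧ pvClsOf id2tag tok ≠ "B") :
    pvConsume id2tag dflt ty (tok :: rest) = pvConsume id2tag dflt ty rest + 1 := by
  simp only [pvConsume]; rw [if_pos h]

lemma pvConsume_cons_neg (id2tag : PySem.Dict Int String) (dflt tok : Int) (ty : String)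
    (rest : List Int)
    (h : ¬(tok ≠ dflt ∧ pvTyOf id2tag tok = ty ∧ pvClsOf id2tag tok ≠ "B")) :
    pvConsume id2tag dflt ty (tok :: rest) = 0 := by
  simp only [pvConsume]; rw [if_neg h]

-- case lemmas for A's loop body
lemma pvStepA_def_none (id2tag : PySem.Dict Int String) (dflt i tok : Int)
    (chunks : List (String × Int × Int)) (hd : tok = dflt) :
    pvStepA id2tag dflt (chunks, none) (i, tok) = (chunks, none) := by
  simp [pvStepA, hd]

lemma pvStepA_def_some (id2tag : PySem.Dict Int String) (dflt i tok st : Int) (ty : String)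
    (chunks : List (String × Int × Int)) (hd : tok = dflt) :
    pvStepA id2tag dflt (chunks, some (ty, st)) (i, tok)
      = (chunks ++ [(ty, st, i - 1)], none) := by
  simp [pvStepA, hd]

lemma pvStepA_nondef_none (id2tag : PySem.Dict Int String) (dflt i tok : Int)
    (chunks : List (String × Int × Int)) (hd : tok ≠ dflt) :
    pvStepA id2tag dflt (chunks, none) (i, tok)
      = (chunks, some (pvTyOf id2tag tok, i)) := by
  unfold pvStepA
  rw [if_neg hd]
  rfl

lemma pvStepA_cont (id2tag : PySem.Dict Int String) (dflt i tok st : Int) (ty : String)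
    (chunks : List (String × Int × Int)) (hd : tok ≠ dflt)
    (h1 : pvTyOf id2tag tok = ty) (h2 : pvClsOf id2tag tok ≠ "B") :
    pvStepA id2tag dflt (chunks, some (ty, st)) (i, tok) = (chunks, some (ty, st)) := by
  unfold pvStepA
  rw [if_neg hd]
  exact if_neg (by rw [not_or, not_ne_iff]; exact ⟨h1, h2⟩)

lemma pvStepA_break (id2tag : PySem.Dict Int String) (dflt i tok st : Int) (ty : String)
    (chunks : List (String × Int × Int)) (hd : tok ≠ dflt)
    (hbr : pvTyOf id2tag tok ≠ ty ∨ pvClsOf id2tag tok = "B") :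
    pvStepA id2tag dflt (chunks, some (ty, st)) (i, tok)
      = (chunks ++ [(ty, st, i - 1)], some (pvTyOf id2tag tok, i)) := by
  unfold pvStepA
  rw [if_neg hd]
  exact if_pos hbr

-- proof-side packaging of the right-hand side of the invariant below
def pvRhs (id2tag : PySem.Dict Int String) (dflt : Int) (i : Int) (rest : List Int) :
    Option (String × Int) → List (String × Int × Int)
  | none => pvAltGo id2tag dflt i rest
  | some (ty, st) =>
    (ty, st, i + (pvConsume id2tag dflt ty rest : Int) - 1) ::
      pvAltGo id2tag dflt (i + (pvConsume id2tag dflt ty rest : Int))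
        (rest.drop (pvConsume id2tag dflt ty rest))

-- the heart: running A's state machine from any state equals B's nested loops, where an open
-- chunk (ty, st) with the head of rest at index i closes after pvConsume more tokens
lemma pvMain (id2tag : PySem.Dict Int String) (dflt : Int) :
    ∀ (rest : List Int) (i : Int) (chunks : List (String × Int × Int))
      (cur : Option (String × Int)),
      pvFinA (i + rest.length)
          ((PySem.List.enumerate rest i).foldl (pvStepA id2tag dflt) (chunks, cur)) =
        chunks ++ pvRhs id2tag dflt i rest cur := by
  intro rest
  induction rest with
  | nil =>
    intro i chunks cur
    cases cur with
    | none => simp [PySem.List.enumerate, pvFinA, pvRhs, pvAltGo_nil]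
    | some p =>
      obtain ⟨ty, st⟩ := p
      simp [PySem.List.enumerate, pvFinA, pvRhs, pvConsume, pvAltGo_nil]
  | cons tok rest ih =>
    intro i chunks cur
    rw [show PySem.List.enumerate (tok :: rest) i
        = (i, tok) :: PySem.List.enumerate rest (i + 1) from by simp [PySem.List.enumerate]]
    simp only [List.foldl_cons, List.length_cons, Nat.cast_add, Nat.cast_one]
    rw [show (i + (↑rest.length + 1) : Int) = (i + 1) + ↑rest.length by ring]
    by_cases hd : tok = dflt
    · cases cur with
      | none =>
        rw [pvStepA_def_none id2tag dflt i tok chunks hd, ih (i + 1) chunks none]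
        simp only [pvRhs]
        rw [pvAltGo_cons, if_pos hd]
      | some p =>
        obtain ⟨ty, st⟩ := p
        rw [pvStepA_def_some id2tag dflt i tok st ty chunks hd,
            ih (i + 1) (chunks ++ [(ty, st, i - 1)]) none]
        simp only [pvRhs]
        rw [pvConsume_cons_neg id2tag dflt tok ty rest (by tauto)]
        simp only [Nat.cast_zero, add_zero, List.drop_zero]
        rw [pvAltGo_cons, if_pos hd]
        simp [List.append_assoc]
    · cases cur with
      | none =>
        rw [pvStepA_nondef_none id2tag dflt i tok chunks hd,
            ih (i + 1) chunks (some (pvTyOf id2tag tok, i))]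
        simp only [pvRhs]
        rw [pvAltGo_cons, if_neg hd]
        rw [show (i + 1 + (↑(pvConsume id2tag dflt (pvTyOf id2tag tok) rest) : Int) - 1)
            = i + ↑(pvConsume id2tag dflt (pvTyOf id2tag tok) rest) by ring]
      | some p =>
        obtain ⟨ty, st⟩ := p
        by_cases hco : pvTyOf id2tag tok = ty ∧ pvClsOf id2tag tok ≠ "B"
        · rw [pvStepA_cont id2tag dflt i tok st ty chunks hd hco.1 hco.2,
              ih (i + 1) chunks (some (ty, st))]
          simp only [pvRhs]
          rw [pvConsume_cons_pos id2tag dflt tok ty rest ⟨hd, hco.1, hco.2⟩]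
          simp only [Nat.cast_add, Nat.cast_one, List.drop_succ_cons]
          rw [show (i + ((↑(pvConsume id2tag dflt ty rest) : Int) + 1))
              = i + 1 + ↑(pvConsume id2tag dflt ty rest) by ring]
        · have hbr : pvTyOf id2tag tok ≠ ty ∨ pvClsOf id2tag tok = "B" := by tauto
          rw [pvStepA_break id2tag dflt i tok st ty chunks hd hbr,
              ih (i + 1) (chunks ++ [(ty, st, i - 1)]) (some (pvTyOf id2tag tok, i))]
          simp only [pvRhs]
          rw [pvConsume_cons_neg id2tag dflt tok ty rest (by tauto)]
          simp only [Nat.cast_zero, add_zero, List.drop_zero]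
          rw [pvAltGo_cons, if_neg hd]
          simp only [List.append_assoc, List.cons_append, List.nil_append]
          rw [show (i + 1 + (↑(pvConsume id2tag dflt (pvTyOf id2tag tok) rest) : Int) - 1)
              = i + ↑(pvConsume id2tag dflt (pvTyOf id2tag tok) rest) by ring]

-- ===== VERDICT (by name: the statement is the Claim_ definition above) =====
theorem ConvertToEntity_spec : Claim_equal_ConvertToEntity := by
  intro seq tag2id _ _
  simp only [Spec_ConvertToEntity, ConvertToEntity, ConvertToEntity_alt]
  rw [pvId2tag_eq]
  cases h : (PySem.Dict.mk tag2id).get? "O" with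
  | none => rfl
  | some dflt =>
    simp only []
    have := pvMain (tag2id.foldl (fun d p => d.insert p.2 p.1) PySem.Dict.empty) dflt seq 0 [] none
    simp only [zero_add, List.nil_append, pvRhs] at this
    exact this
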